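-- pv_equiv track=rewrite | github.com/Neverlbc/Telegram-Bot | bot/services/outdoor_prices.py | _combined_headers
-- ===== SOURCE A (Python) =====
-- def _combined_headers(values: list[list[str]], header_idx: int) -> list[str]:
--     """Combine the SKU header row with nearby merged/section header rows."""
--     rows = values[max(0, header_idx - 3) : header_idx + 1]
--     width = max((len(row) for row in rows), default=0)
--     filled_rows: list[list[str]] = []
--     for row in rows:
--         filled: list[str] = []
--         last = ""
--         for col_idx in range(width):
--             value = row[col_idx].strip() if col_idx < len(row) else ""
--             if value:
--                 last = value
--             filled.append(last)
--         filled_rows.append(filled)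
--
--     headers: list[str] = []
--     for col_idx in range(width):
--         parts: list[str] = []
--         for row in filled_rows:
--             value = row[col_idx].strip()
--             if value and value not in parts:
--                 parts.append(value)
--         headers.append(" ".join(parts))
--     return headers
-- ===== SOURCE B (Python) =====
-- def _combined_headers(values: list[list[str]], header_idx: int) -> list[str]:
--     """Combine the SKU header row with nearby merged/section header rows.
--
--     Column-major single sweep: instead of materialising a forward-filled
--     matrix, keep one carry value per row and build each header column
--     directly from the carries.
--     """
--     rows = values[max(0, header_idx - 3) : header_idx + 1]
--     width = max((len(row) for row in rows), default=0)
--     last = [""] * len(rows)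
--     headers: list[str] = []
--     for col_idx in range(width):
--         parts: list[str] = []
--         for i, row in enumerate(rows):
--             if col_idx < len(row):
--                 v = row[col_idx].strip()
--                 if v:
--                     last[i] = v
--             v = last[i]
--             if v and v not in parts:
--                 parts.append(v)
--         headers.append(" ".join(parts))
--     return headers
-- ===== Notes on version B (the rewrite author's own statement) =====
-- stated objective: simpler
-- what changed: Replaced the two-phase row-major forward-fill (materialised filled_rows matrix plus a second column scan) with a single column-major sweep that keeps one carry value per row and emits each header directly.
import Mathlib
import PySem

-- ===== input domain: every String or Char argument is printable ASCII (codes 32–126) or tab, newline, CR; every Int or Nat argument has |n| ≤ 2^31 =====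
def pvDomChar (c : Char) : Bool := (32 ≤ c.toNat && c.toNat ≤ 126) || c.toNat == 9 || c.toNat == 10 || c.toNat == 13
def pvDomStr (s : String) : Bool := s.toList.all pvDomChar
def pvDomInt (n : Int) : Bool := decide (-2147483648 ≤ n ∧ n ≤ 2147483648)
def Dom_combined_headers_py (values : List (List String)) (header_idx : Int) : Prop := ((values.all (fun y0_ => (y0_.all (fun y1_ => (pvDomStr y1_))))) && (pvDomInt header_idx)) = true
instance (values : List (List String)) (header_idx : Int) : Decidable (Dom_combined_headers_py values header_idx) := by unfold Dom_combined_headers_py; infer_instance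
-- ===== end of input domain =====

-- B replaces A's two-phase row-major forward-fill (a materialised filled_rows matrix plus a
-- second column scan) by a single column-major sweep keeping one carry value per row.

-- ===== PORT A =====
def combined_headers_py (values : List (List String)) (header_idx : Int) : List String :=
  let rows := PySem.List.slice values (some (max 0 (header_idx - 3))) (some (header_idx + 1))
  let width := rows.foldl (fun acc row => max acc row.length) 0
  let filled_rows : List (List String) := rows.foldl (fun frs row =>
    let fl := (List.range width).foldl (fun (st : List String × String) col_idx =>
      let value := if col_idx < row.length then PySem.Str.strip (row.getD col_idx "") else ""
      let last := if value ≠ "" then value else st.2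
      (st.1 ++ [last], last)) ([], "")
    frs ++ [fl.1]) []
  (List.range width).foldl (fun headers col_idx =>
    let parts := filled_rows.foldl (fun (parts : List String) row =>
      let value := PySem.Str.strip (row.getD col_idx "")
      if value ≠ "" ∧ value ∉ parts then parts ++ [value] else parts) []
    headers ++ [PySem.Str.join " " parts]) []

-- ===== PORT B =====
def combined_headers_py_alt (values : List (List String)) (header_idx : Int) : List String :=
  let rows := PySem.List.slice values (some (max 0 (header_idx - 3))) (some (header_idx + 1))
  let width := rows.foldl (fun acc row => max acc row.length) 0
  -- state: (carry vector `last`, headers built so far); `for i, row in enumerate(rows)` with the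
  -- in-place update of last[i] is transcribed as a fold over rows zipped with the carry vector.
  let fin := (List.range width).foldl (fun (st : List String × List String) col_idx =>
    let step := (rows.zip st.1).foldl (fun (q : List String × List String) rl =>
      let v := if col_idx < rl.1.length then
                 (let sv := PySem.Str.strip (rl.1.getD col_idx ""); if sv ≠ "" then sv else rl.2)
               else rl.2
      (q.1 ++ [v], if v ≠ "" ∧ v ∉ q.2 then q.2 ++ [v] else q.2)) ([], [])
    (step.1, st.2 ++ [PySem.Str.join " " step.2]))
    (rows.map (fun _ => ""), [])
  fin.2

-- ===== PRECONDITION & SPEC =====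
def Spec_combined_headers_py (values : List (List String)) (header_idx : Int) (out : List String) : Prop := out = combined_headers_py_alt values header_idx
instance (values : List (List String)) (header_idx : Int) (out : List String) : Decidable (Spec_combined_headers_py values header_idx out) := by unfold Spec_combined_headers_py; infer_instance

-- ===== CLAIM (what is proved, stated in full; the proofs are below) =====
def Claim_equal_combined_headers_py : Prop := ∀ (values : List (List String)) (header_idx : Int), Dom_combined_headers_py values header_idx → Spec_combined_headers_py values header_idx (combined_headers_py values header_idx)

-- ===== LEMMAS AND PROOFS =====

-- the forward-fill carry of one row after consuming columns 0 .. c-1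
def pvCarry (row : List String) (c : Nat) : String :=
  (List.range c).foldl (fun last col_idx =>
    let value := if col_idx < row.length then PySem.Str.strip (row.getD col_idx "") else ""
    if value ≠ "" then value else last) ""

-- the per-column order-preserving dedup accumulation both programs perform
def pvParts (rows : List (List String)) (col : Nat) : List String :=
  rows.foldl (fun parts row =>
    let v := pvCarry row (col + 1)
    if v ≠ "" ∧ v ∉ parts then parts ++ [v] else parts) []

theorem pvCarry_succ (row : List String) (c : Nat) :
    pvCarry row (c + 1) =
      (if (if c < row.length then PySem.Str.strip (row.getD c "") else "") ≠ ""
       then (if c < row.length then PySem.Str.strip (row.getD c "") else "")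
       else pvCarry row c) := by
  simp [pvCarry, List.range_succ]

-- strip is idempotent -------------------------------------------------------
theorem pv_dropWhile_idem {α : Type} (p : α → Bool) (l : List α) :
    List.dropWhile p (List.dropWhile p l) = List.dropWhile p l := by
  induction l with
  | nil => simp
  | cons a t ih =>
    by_cases h : p a = true
    · simpa only [List.dropWhile_cons_of_pos h] using ih
    · simp [h]

theorem pv_rstrip_idem (l : List Char) :
    PySem.Chars.rstrip (PySem.Chars.rstrip l) = PySem.Chars.rstrip l := by
  simp [PySem.Chars.rstrip, pv_dropWhile_idem]

theorem pv_lstrip_rstrip (t : List Char)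
    (ht : List.dropWhile PySem.Chars.isspace t = t) :
    PySem.Chars.lstrip (PySem.Chars.rstrip t) = PySem.Chars.rstrip t := by
  have hpre : PySem.Chars.rstrip t <+: t := by
    have h := List.dropWhile_suffix (l := t.reverse) PySem.Chars.isspace
    have h2 := (List.reverse_prefix (l₁ := List.dropWhile PySem.Chars.isspace t.reverse)
      (l₂ := t.reverse)).2 h
    simpa [PySem.Chars.rstrip] using h2
  obtain ⟨suf, hsuf⟩ := hpre
  cases hc : PySem.Chars.rstrip t with
  | nil => simp [PySem.Chars.lstrip]
  | cons a r =>
    have hta : t = a :: (r ++ suf) := by rw [← hsuf, hc]; simp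
    have hpa : PySem.Chars.isspace a = false := by
      by_contra h
      simp only [Bool.not_eq_false] at h
      rw [hta, List.dropWhile_cons_of_pos h] at ht
      have hlen := congrArg List.length ht
      have hle := (List.dropWhile_suffix (l := r ++ suf) PySem.Chars.isspace).length_le
      simp only [List.length_cons] at hlen
      omega
    simp [PySem.Chars.lstrip, hpa]

theorem pv_chars_strip_idem (l : List Char) :
    PySem.Chars.strip (PySem.Chars.strip l) = PySem.Chars.strip l := by
  unfold PySem.Chars.strip
  rw [pv_lstrip_rstrip (PySem.Chars.lstrip l)
    (by simpa [PySem.Chars.lstrip] using pv_dropWhile_idem PySem.Chars.isspace l)]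
  exact pv_rstrip_idem _

theorem pv_strip_idem (s : String) :
    PySem.Str.strip (PySem.Str.strip s) = PySem.Str.strip s := by
  unfold PySem.Str.strip
  simp [pv_chars_strip_idem]

theorem pvCarry_strip (row : List String) (c : Nat) :
    PySem.Str.strip (pvCarry row c) = pvCarry row c := by
  induction c with
  | zero => simp [pvCarry]; decide
  | succ n ih =>
    rw [pvCarry_succ]
    have hemp : PySem.Str.strip "" = "" := by decide
    split_ifs <;> simp_all [pv_strip_idem]

-- fold shapes ---------------------------------------------------------------
theorem pv_foldl_append_map {α β : Type} (l : List α) (g : α → β) (acc : List β) :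
    l.foldl (fun acc x => acc ++ [g x]) acc = acc ++ l.map g := by
  induction l generalizing acc with
  | nil => simp
  | cons a t ih => simp [ih]

theorem pv_foldl_zip_map {α β γ : Type} (l : List α) (h : α → β)
    (f : γ → α × β → γ) (init : γ) :
    (l.zip (l.map h)).foldl f init = l.foldl (fun st x => f st (x, h x)) init := by
  induction l generalizing init with
  | nil => rfl
  | cons a t ih => simp [ih]

theorem pv_foldl_pair_split {α : Type} (l : List α) (g : α → String)
    (P : List String → String → List String) (a1 a2 : List String) :
    (l.foldl (fun (q : List String × List String) x => (q.1 ++ [g x], P q.2 (g x))) (a1, a2))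
      = (a1 ++ l.map g, l.foldl (fun parts x => P parts (g x)) a2) := by
  induction l generalizing a1 a2 with
  | nil => simp
  | cons a t ih => simp [ih]

-- A's inner forward-fill loop produces the carries ---------------------------
theorem pvFillA (row : List String) (n : Nat) :
    (List.range n).foldl (fun (st : List String × String) col_idx =>
        let value := if col_idx < row.length then PySem.Str.strip (row.getD col_idx "") else ""
        let last := if value ≠ "" then value else st.2
        (st.1 ++ [last], last)) ([], "")
      = ((List.range n).map (fun c => pvCarry row (c + 1)), pvCarry row n) := by
  induction n with
  | zero => simp [pvCarry]
  | succ m ih =>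
    rw [List.range_succ, List.foldl_append, ih]
    simp only [List.foldl_cons, List.foldl_nil, List.map_append, List.map_cons, List.map_nil]
    rw [pvCarry_succ row m]

-- getD on a column of the filled matrix -------------------------------------
theorem pv_getD_map_range {β : Type} (f : Nat → β) (n c : Nat) (d : β) (h : c < n) :
    ((List.range n).map f).getD c d = f c := by
  rw [List.getD_eq_getElem?_getD]
  simp [h]

-- B's outer loop invariant ---------------------------------------------------
theorem pvB_invariant (rows : List (List String)) (n : Nat) :
    (List.range n).foldl (fun (st : List String × List String) col_idx =>
        let step := (rows.zip st.1).foldl (fun (q : List String × List String) rl =>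
          let v := if col_idx < rl.1.length then
                     (let sv := PySem.Str.strip (rl.1.getD col_idx ""); if sv ≠ "" then sv else rl.2)
                   else rl.2
          (q.1 ++ [v], if v ≠ "" ∧ v ∉ q.2 then q.2 ++ [v] else q.2)) ([], [])
        (step.1, st.2 ++ [PySem.Str.join " " step.2]))
      (rows.map (fun _ => ""), [])
      = (rows.map (fun r => pvCarry r n),
         (List.range n).map (fun c => PySem.Str.join " " (pvParts rows c))) := by
  induction n with
  | zero => simp [pvCarry]
  | succ m ih =>
    rw [List.range_succ, List.foldl_append, ih]
    simp only [List.foldl_cons, List.foldl_nil, List.map_append, List.map_cons, List.map_nil]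
    rw [pv_foldl_zip_map]
    have hstep : (fun (q : List String × List String) (x : List String) =>
        (q.1 ++ [if m < x.length then
                   (let sv := PySem.Str.strip (x.getD m ""); if sv ≠ "" then sv else pvCarry x m)
                 else pvCarry x m],
         if (if m < x.length then
               (let sv := PySem.Str.strip (x.getD m ""); if sv ≠ "" then sv else pvCarry x m)
             else pvCarry x m) ≠ "" ∧
            (if m < x.length then
               (let sv := PySem.Str.strip (x.getD m ""); if sv ≠ "" then sv else pvCarry x m)
             else pvCarry x m) ∉ q.2
         then q.2 ++ [if m < x.length then
               (let sv := PySem.Str.strip (x.getD m ""); if sv ≠ "" then sv else pvCarry x m)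
             else pvCarry x m] else q.2))
      = (fun (q : List String × List String) (x : List String) =>
         (q.1 ++ [pvCarry x (m + 1)],
          if pvCarry x (m + 1) ≠ "" ∧ pvCarry x (m + 1) ∉ q.2
          then q.2 ++ [pvCarry x (m + 1)] else q.2)) := by
      funext q x
      have hv : (if m < x.length then
                   (let sv := PySem.Str.strip (x.getD m ""); if sv ≠ "" then sv else pvCarry x m)
                 else pvCarry x m) = pvCarry x (m + 1) := by
        rw [pvCarry_succ]
        by_cases h : m < x.length
        · simp [h]
        · simp [h]
      rw [hv]
    simp only [hstep]
    rw [pv_foldl_pair_split rows (fun x => pvCarry x (m + 1))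
      (fun parts v => if v ≠ "" ∧ v ∉ parts then parts ++ [v] else parts) [] []]
    simp [pvParts]

-- A's per-column parts equal pvParts ----------------------------------------
theorem pvPartsA (rows : List (List String)) (width col : Nat) (hcol : col < width) :
    (rows.map (fun r => (List.range width).map (fun c => pvCarry r (c + 1)))).foldl
      (fun (parts : List String) row =>
        let value := PySem.Str.strip (row.getD col "")
        if value ≠ "" ∧ value ∉ parts then parts ++ [value] else parts) []
    = pvParts rows col := by
  rw [List.foldl_map]
  unfold pvParts
  congr 1
  funext parts r
  rw [pv_getD_map_range (fun c => pvCarry r (c + 1)) width col "" hcol, pvCarry_strip]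

-- ===== VERDICT (by name: the statement is the Claim_ definition above) =====
theorem combined_headers_py_spec : Claim_equal_combined_headers_py := by
  intro values header_idx _
  unfold Spec_combined_headers_py combined_headers_py combined_headers_py_alt
  simp only []
  set rows := PySem.List.slice values (some (max 0 (header_idx - 3))) (some (header_idx + 1)) with hrows
  set width := rows.foldl (fun acc row => max acc row.length) 0 with hwidth
  -- A side
  have hfill : rows.foldl (fun frs row =>
      let fl := (List.range width).foldl (fun (st : List String × String) col_idx =>
        let value := if col_idx < row.length then PySem.Str.strip (row.getD col_idx "") else ""
        let last := if value ≠ "" then value else st.2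
        (st.1 ++ [last], last)) ([], "")
      frs ++ [fl.1]) ([] : List (List String))
      = rows.map (fun r => (List.range width).map (fun c => pvCarry r (c + 1))) := by
    have h1 : (fun (frs : List (List String)) (row : List String) =>
        let fl := (List.range width).foldl (fun (st : List String × String) col_idx =>
          let value := if col_idx < row.length then PySem.Str.strip (row.getD col_idx "") else ""
          let last := if value ≠ "" then value else st.2
          (st.1 ++ [last], last)) ([], "")
        frs ++ [fl.1])
        = (fun frs row => frs ++ [(List.range width).map (fun c => pvCarry row (c + 1))]) := by
      funext frs row
      simp only [pvFillA row width]
    rw [h1, pv_foldl_append_map rows (fun row => (List.range width).map (fun c => pvCarry row (c + 1))) []]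
    simp
  rw [hfill, pvB_invariant rows width]
  rw [pv_foldl_append_map (List.range width) _ []]
  simp only [List.nil_append]
  apply List.map_congr_left
  intro col hcolmem
  have hcol : col < width := List.mem_range.mp hcolmem
  simp only [pvPartsA rows width col hcol]
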